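-- pv_equiv track=rewrite | github.com/ChristopheVdE/Puzzle-solver | Binairo_solver.py | check_identical
-- ===== SOURCE A (Python) =====
-- def column(board, col):
--     column_values = []
--     for row in board:
--         column_values.append(row[col])
--     return column_values
--
-- def check_identical(board, board_size, empty_pos, propposed_val):
--     # insert the proposed value into the (test)-board to test if this creates duplicate rows/ columns
--     board[empty_pos[0]][empty_pos[1]] == propposed_val
--     # create list of columns
--     columns = []
--     for i in range(0, board_size):
--         columns.append(column(board, i))
--     # check for identical rows and columns
--     for i in range(0, board_size):
--         # check if proposed value creates a identical row
--         if (
--             board[empty_pos[0]] == board[i]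
--             and empty_pos[0] != i
--             # no empty values allowed
--             and (not "." in board[empty_pos[0]] and not "." in board[i])
--         ):
--             return False
--         # check if poposed value creates an identical column
--         if (
--             columns[empty_pos[1]] == columns[i]
--             and empty_pos[1] != i
--             # no empty values allowed
--             and (not "." in columns[empty_pos[1]] and not "." in columns[i])
--         ):
--             return False
--     return True
-- ===== SOURCE B (Python) =====
-- def has_other_occurrence(lines, target, pos):
--     # one pass recording the first and last index of each line value
--     first, last = {}, {}
--     for i, line in enumerate(lines):
--         key = tuple(line)
--         if key not in first:
--             first[key] = i
--         last[key] = i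
--     key = tuple(target)
--     # an occurrence exists at some index other than pos  <=>  key present and not solely at pos
--     return key in first and (first[key] != pos or last[key] != pos)
--
-- def check_identical(board, board_size, empty_pos, propposed_val):
--     # propposed_val is unused: A's first line is a no-op comparison, not an assignment.
--     r, c = empty_pos
--     n = board_size
--     rows = [board[i] for i in range(n)]
--     target_row = board[r]
--     if "." not in target_row and has_other_occurrence(rows, target_row, r):
--         return False
--     if n > 0:
--         cols = [[row[j] for row in board] for j in range(n)]
--         target_col = cols[c]
--         if "." not in target_col and has_other_occurrence(cols, target_col, c):
--             return False
--     return True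
-- ===== Notes on version B (the rewrite author's own statement) =====
-- stated objective: alternative
-- what changed: Replaces A's index loop that pairwise-compares the target row/column against every other row/column (re-testing completeness of both sides at each step) with one indexing pass that builds first- and last-occurrence tables keyed by the line's tuple; a duplicate elsewhere then exists iff the target's key is present with first or last index different from the target position, decided by a single lookup.
-- outside the precondition, e.g. on check_identical([['x', 'x']], 2, (0, 1), '0'): A returns False, B raises IndexError; on check_identical([['0', '1', '1'], ['1', '1', '.']], 1, (-2, -2), '0'): A returns False, B returns False
import Mathlib
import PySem

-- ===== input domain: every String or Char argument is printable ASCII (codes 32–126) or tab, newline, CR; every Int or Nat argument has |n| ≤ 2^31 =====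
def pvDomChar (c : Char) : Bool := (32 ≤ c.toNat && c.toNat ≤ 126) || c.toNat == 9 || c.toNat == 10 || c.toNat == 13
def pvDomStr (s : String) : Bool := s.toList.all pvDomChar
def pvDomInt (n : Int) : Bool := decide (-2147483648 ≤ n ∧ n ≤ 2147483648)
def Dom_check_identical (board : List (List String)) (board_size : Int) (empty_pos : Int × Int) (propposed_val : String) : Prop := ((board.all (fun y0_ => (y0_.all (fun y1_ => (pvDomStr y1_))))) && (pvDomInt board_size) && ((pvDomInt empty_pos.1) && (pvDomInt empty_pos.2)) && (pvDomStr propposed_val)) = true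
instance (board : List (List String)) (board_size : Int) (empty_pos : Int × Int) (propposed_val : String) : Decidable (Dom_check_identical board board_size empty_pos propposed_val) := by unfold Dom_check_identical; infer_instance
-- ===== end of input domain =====

-- B replaces A's pairwise scan by one pass building first-/last-occurrence index tables and a single
-- lookup per target; equivalence is about the return value only (A's first line is a no-op comparison,
-- never an assignment, so neither program mutates the board).

-- ===== PORT A =====
-- column(board, col): append row[col] for each row
def pvColumn (board : List (List String)) (col : Int) : List String :=
  board.foldl (fun acc row => acc ++ [PySem.List.pyGetD row col ""]) []

def check_identical (board : List (List String)) (board_size : Int) (empty_pos : Int × Int) (propposed_val : String) : Bool :=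
  -- first line of A: 'board[empty_pos[0]][empty_pos[1]] == propposed_val' — a no-op comparison (evaluated, discarded)
  let _ := (PySem.List.pyGetD (PySem.List.pyGetD board empty_pos.1 []) empty_pos.2 "" == propposed_val)
  -- columns = [column(board, i) for i in range(board_size)] (built by append)
  let columns := (PySem.List.pyRange 0 board_size 1).foldl (fun acc i => acc ++ [pvColumn board i]) []
  -- the scan loop: return False at the first i whose row- or column-condition fires, else True
  (PySem.List.pyRange 0 board_size 1).all (fun i =>
    let rowT := PySem.List.pyGetD board empty_pos.1 []
    let rowI := PySem.List.pyGetD board i []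
    let colT := PySem.List.pyGetD columns empty_pos.2 []
    let colI := PySem.List.pyGetD columns i []
    !(rowT == rowI && empty_pos.1 != i && (!rowT.contains "." && !rowI.contains ".")) &&
    !(colT == colI && empty_pos.2 != i && (!colT.contains "." && !colI.contains ".")))

-- ===== PORT B =====
-- the 'for i, line in enumerate(lines)' loop of has_other_occurrence: first/last occurrence tables
def pvFLloop : List (List String) → Int → PySem.Dict (List String) Int → PySem.Dict (List String) Int →
    PySem.Dict (List String) Int × PySem.Dict (List String) Int
  | [], _, f, l => (f, l)
  | line :: rest, i, f, l =>
      pvFLloop rest (i + 1) (if f.contains line then f else f.insert line i) (l.insert line i)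

-- has_other_occurrence(lines, target, pos); 'last[key]' is ported as getD (the key is present whenever read)
def pvHasOther (lines : List (List String)) (target : List String) (pos : Int) : Bool :=
  let fl := pvFLloop lines 0 PySem.Dict.empty PySem.Dict.empty
  fl.1.contains target && ((fl.1.getD target 0 != pos) || (fl.2.getD target 0 != pos))

def check_identical_alt (board : List (List String)) (board_size : Int) (empty_pos : Int × Int) (propposed_val : String) : Bool :=
  let r := empty_pos.1
  let c := empty_pos.2
  let n := board_size
  let rows := (PySem.List.pyRange 0 n 1).map (fun i => PySem.List.pyGetD board i [])
  let target_row := PySem.List.pyGetD board r []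
  if !target_row.contains "." && pvHasOther rows target_row r then false
  else if 0 < n then
    let cols := (PySem.List.pyRange 0 n 1).map (fun j => board.map (fun row => PySem.List.pyGetD row j ""))
    let target_col := PySem.List.pyGetD cols c []
    if !target_col.contains "." && pvHasOther cols target_col c then false
    else true
  else true

-- ===== PRECONDITION & SPEC =====
-- Pre_ excludes exactly the inputs where A raises (invalid target indices, a board/row too short for the
-- scan or the column build, a column index outside the built columns list), plus the lazily-reached corner
-- where A returns False on an early duplicate before ever touching such an out-of-range index (B raises or
-- agrees there; see the cited examples).
def Pre_check_identical (board : List (List String)) (board_size : Int) (empty_pos : Int × Int) (propposed_val : String) : Prop :=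
  PySem.Raise.InRange board.length empty_pos.1 ∧
  PySem.Raise.InRange (PySem.List.pyGetD board empty_pos.1 []).length empty_pos.2 ∧
  (board_size ≤ 0 ∨
    (board_size ≤ (board.length : Int) ∧ (∀ row ∈ board, board_size ≤ (row.length : Int)) ∧
      -board_size ≤ empty_pos.2 ∧ empty_pos.2 < board_size))
instance (board : List (List String)) (board_size : Int) (empty_pos : Int × Int) (propposed_val : String) : Decidable (Pre_check_identical board board_size empty_pos propposed_val) := by unfold Pre_check_identical; infer_instance

def pvWitness_check_identical : List (List String) × Int × (Int × Int) × String :=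
  ([["0", "1"], ["1", "."]], 2, (1, 1), "0")

def Spec_check_identical (board : List (List String)) (board_size : Int) (empty_pos : Int × Int) (propposed_val : String) (out : Bool) : Prop := out = check_identical_alt board board_size empty_pos propposed_val
instance (board : List (List String)) (board_size : Int) (empty_pos : Int × Int) (propposed_val : String) (out : Bool) : Decidable (Spec_check_identical board board_size empty_pos propposed_val out) := by unfold Spec_check_identical; infer_instance

-- ===== CLAIM (what is proved, stated in full; the proofs are below) =====
def Claim_equal_check_identical : Prop := ∀ (board : List (List String)) (board_size : Int) (empty_pos : Int × Int) (propposed_val : String), Dom_check_identical board board_size empty_pos propposed_val → Pre_check_identical board board_size empty_pos propposed_val → Spec_check_identical board board_size empty_pos propposed_val (check_identical board board_size empty_pos propposed_val)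

-- ===== LEMMAS AND PROOFS =====

-- index of the first / last occurrence of t in a list (proof-side characterisations of B's two tables)
def pvFirstIdx? (t : List String) : List (List String) → Option Nat
  | [] => none
  | x :: xs => if x = t then some 0 else (pvFirstIdx? t xs).map (· + 1)

def pvLastIdx? (t : List String) : List (List String) → Option Nat
  | [] => none
  | x :: xs =>
      match pvLastIdx? t xs with
      | some j => some (j + 1)
      | none => if x = t then some 0 else none

lemma pvFLloop_fst_get (lines : List (List String)) (i : Int)
    (f l : PySem.Dict (List String) Int) (t : List String) :
    (pvFLloop lines i f l).1.get? t =
      (match f.get? t with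
       | some v => some v
       | none => (pvFirstIdx? t lines).map (fun j => i + (j : Int))) := by
  induction lines generalizing i f l with
  | nil => cases hft : f.get? t <;> simp [pvFLloop, pvFirstIdx?, hft]
  | cons x xs ih =>
    simp only [pvFLloop]
    rw [ih]
    by_cases hc : f.contains x = true
    · simp only [hc, if_true]
      cases hft : f.get? t with
      | some v => simp
      | none =>
        have hxt : ¬ x = t := by
          intro h; subst h
          rw [PySem.Dict.contains_eq_isSome_get?, hft] at hc
          simp at hc
        simp only [pvFirstIdx?, hxt, if_false]
        cases hfi : pvFirstIdx? t xs <;> simp <;> push_cast <;> ring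
    · have hcf : f.contains x = false := by simpa using hc
      simp only [hcf, Bool.false_eq_true, if_false]
      rw [PySem.Dict.get?_insert]
      by_cases hxt : t = x
      · subst hxt
        have hft : f.get? t = none := by
          rw [PySem.Dict.get?_eq_none_iff_contains]; simpa using hc
        simp [hft, pvFirstIdx?]
      · have hxt' : ¬ x = t := fun h => hxt h.symm
        simp only [hxt, if_false]
        cases hft : f.get? t with
        | some v => simp
        | none =>
          simp only [pvFirstIdx?, hxt', if_false]
          cases hfi : pvFirstIdx? t xs <;> simp <;> push_cast <;> ring

lemma pvFLloop_snd_get (lines : List (List String)) (i : Int)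
    (f l : PySem.Dict (List String) Int) (t : List String) :
    (pvFLloop lines i f l).2.get? t =
      (match pvLastIdx? t lines with
       | some j => some (i + (j : Int))
       | none => l.get? t) := by
  induction lines generalizing i f l with
  | nil => simp [pvFLloop, pvLastIdx?]
  | cons x xs ih =>
    simp only [pvFLloop]
    rw [ih]
    cases hlx : pvLastIdx? t xs with
    | some j =>
      simp only [pvLastIdx?, hlx]
      congr 1
      push_cast
      ring
    | none =>
      simp only [pvLastIdx?, hlx]
      rw [PySem.Dict.get?_insert]
      by_cases hxt : x = t
      · subst hxt; simp
      · have hxt' : ¬ t = x := fun h => hxt h.symm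
        simp [hxt, hxt']

lemma pvFirstIdx?_some (t : List String) (lines : List (List String)) (j : Nat)
    (h : pvFirstIdx? t lines = some j) : lines[j]? = some t := by
  induction lines generalizing j with
  | nil => simp [pvFirstIdx?] at h
  | cons x xs ih =>
    by_cases hxt : x = t
    · simp [pvFirstIdx?, hxt] at h
      subst h; simp [hxt]
    · simp [pvFirstIdx?, hxt] at h
      obtain ⟨j', hj', hjj⟩ := h
      subst hjj
      simpa using ih j' hj'

lemma pvFirstIdx?_min (t : List String) (lines : List (List String)) (j k : Nat)
    (h : pvFirstIdx? t lines = some j) (hk : lines[k]? = some t) : j ≤ k := by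
  induction lines generalizing j k with
  | nil => simp at hk
  | cons x xs ih =>
    by_cases hxt : x = t
    · simp [pvFirstIdx?, hxt] at h; omega
    · simp [pvFirstIdx?, hxt] at h
      obtain ⟨j', hj', hjj⟩ := h
      cases k with
      | zero => simp at hk; exact absurd hk hxt
      | succ k' =>
        simp at hk
        have := ih j' k' hj' hk
        omega

lemma pvFirstIdx?_of_mem (t : List String) (lines : List (List String)) (k : Nat)
    (hk : lines[k]? = some t) : (pvFirstIdx? t lines).isSome := by
  induction lines generalizing k with
  | nil => simp at hk
  | cons x xs ih =>
    by_cases hxt : x = t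
    · simp [pvFirstIdx?, hxt]
    · cases k with
      | zero => simp at hk; exact absurd hk hxt
      | succ k' =>
        simp at hk
        have := ih k' hk
        simpa [pvFirstIdx?, hxt] using this

lemma pvLastIdx?_some (t : List String) (lines : List (List String)) (j : Nat)
    (h : pvLastIdx? t lines = some j) : lines[j]? = some t := by
  induction lines generalizing j with
  | nil => simp [pvLastIdx?] at h
  | cons x xs ih =>
    cases hlx : pvLastIdx? t xs with
    | some j' =>
      simp [pvLastIdx?, hlx] at h
      subst h
      simpa using ih j' hlx
    | none =>
      by_cases hxt : x = t
      · simp [pvLastIdx?, hlx, hxt] at h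
        subst h; simp [hxt]
      · simp [pvLastIdx?, hlx, hxt] at h

-- if t has a first occurrence it has a last occurrence
lemma pvLastIdx?_isSome (t : List String) (lines : List (List String)) (jf : Nat)
    (h : pvFirstIdx? t lines = some jf) : (pvLastIdx? t lines).isSome := by
  induction lines generalizing jf with
  | nil => simp [pvFirstIdx?] at h
  | cons x xs ih =>
    by_cases hxt : x = t
    · cases hlx : pvLastIdx? t xs <;> simp [pvLastIdx?, hlx, hxt]
    · simp [pvFirstIdx?, hxt] at h
      obtain ⟨j', hj', _⟩ := h
      have := ih j' hj'
      cases hlx : pvLastIdx? t xs with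
      | none => rw [hlx] at this; simp at this
      | some j'' => simp [pvLastIdx?, hlx]

lemma pvLastIdx?_max (t : List String) (lines : List (List String)) (j k : Nat)
    (h : pvLastIdx? t lines = some j) (hk : lines[k]? = some t) : k ≤ j := by
  induction lines generalizing j k with
  | nil => simp at hk
  | cons x xs ih =>
    cases hlx : pvLastIdx? t xs with
    | some j' =>
      simp [pvLastIdx?, hlx] at h
      cases k with
      | zero => omega
      | succ k' =>
        simp at hk
        have := ih j' k' hlx hk
        omega
    | none =>
      by_cases hxt : x = t
      · simp [pvLastIdx?, hlx, hxt] at h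
        cases k with
        | zero => omega
        | succ k' =>
          simp at hk
          have hfs := pvFirstIdx?_of_mem t xs k' hk
          cases hfx : pvFirstIdx? t xs with
          | none => rw [hfx] at hfs; simp at hfs
          | some jf =>
            have := pvLastIdx?_isSome t xs jf hfx
            rw [hlx] at this
            simp at this
      · simp [pvLastIdx?, hlx, hxt] at h

-- B's table test says: t occurs in lines at some index other than pos
lemma pvHasOther_iff (lines : List (List String)) (t : List String) (pos : Int) :
    pvHasOther lines t pos = true ↔
      ∃ j : Nat, lines[j]? = some t ∧ (j : Int) ≠ pos := by
  unfold pvHasOther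
  rw [Bool.and_eq_true, PySem.Dict.contains_eq_isSome_get?, pvFLloop_fst_get]
  simp only [PySem.Dict.get?_empty]
  constructor
  · rintro ⟨hsome, hor⟩
    cases hf : pvFirstIdx? t lines with
    | none => rw [hf] at hsome; simp at hsome
    | some a =>
      have hla := pvLastIdx?_isSome t lines a hf
      cases hl : pvLastIdx? t lines with
      | none => rw [hl] at hla; simp at hla
      | some b =>
        have hga : lines[a]? = some t := pvFirstIdx?_some t lines a hf
        have hgb : lines[b]? = some t := pvLastIdx?_some t lines b hl
        rw [Bool.or_eq_true, bne_iff_ne, bne_iff_ne] at hor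
        have hfd : (pvFLloop lines 0 PySem.Dict.empty PySem.Dict.empty).1.getD t 0 = (a : Int) := by
          rw [PySem.Dict.getD_eq_get?_getD, pvFLloop_fst_get]
          simp [hf]
        have hld : (pvFLloop lines 0 PySem.Dict.empty PySem.Dict.empty).2.getD t 0 = (b : Int) := by
          rw [PySem.Dict.getD_eq_get?_getD, pvFLloop_snd_get]
          simp [hl]
        rw [hfd, hld] at hor
        rcases hor with h | h
        · exact ⟨a, hga, by simpa using h⟩
        · exact ⟨b, hgb, by simpa using h⟩
  · rintro ⟨j, hj, hjp⟩
    have hfs := pvFirstIdx?_of_mem t lines j hj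
    cases hf : pvFirstIdx? t lines with
    | none => rw [hf] at hfs; simp at hfs
    | some a =>
      have hls := pvLastIdx?_isSome t lines a hf
      cases hl : pvLastIdx? t lines with
      | none => rw [hl] at hls; simp at hls
      | some b =>
        refine ⟨by simp, ?_⟩
        have hfd : (pvFLloop lines 0 PySem.Dict.empty PySem.Dict.empty).1.getD t 0 = (a : Int) := by
          rw [PySem.Dict.getD_eq_get?_getD, pvFLloop_fst_get]
          simp [hf]
        have hld : (pvFLloop lines 0 PySem.Dict.empty PySem.Dict.empty).2.getD t 0 = (b : Int) := by
          rw [PySem.Dict.getD_eq_get?_getD, pvFLloop_snd_get]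
          simp [hl]
        rw [hfd, hld, Bool.or_eq_true, bne_iff_ne, bne_iff_ne]
        by_contra hcon
        rw [not_or] at hcon
        obtain ⟨ha, hb⟩ := hcon
        have h1 : a ≤ j := pvFirstIdx?_min t lines a j hf hj
        have h2 : j ≤ b := pvLastIdx?_max t lines b j hl hj
        have : (j : Int) = pos := by omega
        exact hjp this

-- A's early-return loop over two negated conditions is the conjunction of two separate 'any' scans
lemma pv_all_split (l : List Int) (p q : Int → Bool) :
    (l.all fun i => !p i && !q i) = (!(l.any p) && !(l.any q)) := by
  induction l with
  | nil => rfl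
  | cons x xs ih =>
    rw [List.all_cons, List.any_cons, List.any_cons, ih]
    cases p x <;> cases q x <;> simp

-- A's per-index duplicate scan over range(n) equals target-completeness plus B's table test on the
-- comprehension list; fA (A's per-index line) may differ from f (B's) outside the range
lemma pv_bridge (n pos : Int) (t : List String) (fA f : Int → List String)
    (hf : ∀ i, 0 ≤ i → i < n → fA i = f i) :
    ((PySem.List.pyRange 0 n 1).any (fun i =>
        t == fA i && pos != i && (!t.contains "." && !(fA i).contains "."))) =
      (!t.contains "." && pvHasOther ((PySem.List.pyRange 0 n 1).map f) t pos) := by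
  rw [Bool.eq_iff_iff, Bool.and_eq_true, List.any_eq_true, pvHasOther_iff]
  constructor
  · rintro ⟨i, hi, hcond⟩
    rw [PySem.List.mem_pyRange_one] at hi
    rw [Bool.and_eq_true, Bool.and_eq_true, Bool.and_eq_true, beq_iff_eq, bne_iff_ne] at hcond
    obtain ⟨⟨ht, hne⟩, hct, _⟩ := hcond
    refine ⟨hct, i.toNat, ?_, ?_⟩
    · rw [List.getElem?_map]
      have hidx : (PySem.List.pyRange 0 n 1)[i.toNat]? = some i := by
        rw [PySem.List.getElem?_pyRange_one]
        have hlen : i.toNat < (n - 0).toNat := by omega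
        simp
        omega
      rw [hidx]
      simp [← hf i hi.1 hi.2, ← ht]
    · intro hc
      apply hne
      omega
  · rintro ⟨hct, j, hj, hjp⟩
    rw [List.getElem?_map] at hj
    cases hidx : (PySem.List.pyRange 0 n 1)[j]? with
    | none => rw [hidx] at hj; simp at hj
    | some i =>
      rw [hidx] at hj
      simp only [Option.map_some, Option.some.injEq] at hj
      have him : i ∈ PySem.List.pyRange 0 n 1 := by
        exact List.mem_of_getElem? hidx
      have hib := PySem.List.mem_pyRange_one.mp him
      have hji : i = (j : Int) := by
        have hlen : j < (PySem.List.pyRange 0 n 1).length := (List.getElem?_eq_some_iff.mp hidx).1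
        rw [List.getElem?_eq_getElem hlen, PySem.List.getElem_pyRange_one] at hidx
        simp at hidx
        omega
      refine ⟨i, him, ?_⟩
      rw [Bool.and_eq_true, Bool.and_eq_true, Bool.and_eq_true, beq_iff_eq, bne_iff_ne]
      have hfi : fA i = f i := hf i hib.1 hib.2
      refine ⟨⟨by rw [hfi, hj], fun h => hjp (by omega)⟩, hct, by rw [hfi, hj]; exact hct⟩

-- ===== VERDICT (by name: the statement is the Claim_ definition above) =====
theorem check_identical_spec : Claim_equal_check_identical := by
  intro board board_size empty_pos propposed_val _ _
  unfold Spec_check_identical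
  unfold check_identical check_identical_alt pvColumn
  simp only [PySem.List.foldl_append_singleton_eq_map, List.nil_append]
  rw [pv_all_split]
  rw [pv_bridge board_size empty_pos.1 (PySem.List.pyGetD board empty_pos.1 [])
        (fun i => PySem.List.pyGetD board i []) (fun i => PySem.List.pyGetD board i [])
        (fun _ _ _ => rfl)]
  rw [pv_bridge board_size empty_pos.2
        (PySem.List.pyGetD ((PySem.List.pyRange 0 board_size 1).map
          (fun j => board.map (fun row => PySem.List.pyGetD row j ""))) empty_pos.2 [])
        (fun i => PySem.List.pyGetD ((PySem.List.pyRange 0 board_size 1).map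
          (fun j => board.map (fun row => PySem.List.pyGetD row j ""))) i [])
        (fun j => board.map (fun row => PySem.List.pyGetD row j ""))
        (fun i h0 hn => PySem.List.pyGetD_map_pyRange_of_nonneg _ _ _ _ h0 hn)]
  by_cases hn : 0 < board_size
  · simp only [hn, if_true]
    cases hrow : (!(PySem.List.pyGetD board empty_pos.1 []).contains "." &&
        pvHasOther ((PySem.List.pyRange 0 board_size 1).map (fun i => PySem.List.pyGetD board i []))
          (PySem.List.pyGetD board empty_pos.1 []) empty_pos.1) <;> simp
  · simp only [hn, if_false]
    have hnil : PySem.List.pyRange 0 board_size 1 = [] :=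
      PySem.List.pyRange_one_eq_nil (by omega)
    rw [hnil]
    simp [pvHasOther, pvFLloop]
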